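-- pv_equiv track=rewrite | github.com/UKPLab/germeval2017-sentiment-detection | mtl-sequence-tagging-framework/src/shared_modules/eval/argmin_post_processing.py | readDocs
-- ===== SOURCE A (Python) =====
-- def readDocs(lines):
--     docs = []
--     doc = []
--     for line in lines:
--         if line.strip() == "":
--             if doc != []: docs.append(doc)
--             doc = []
--         else:
--             doc.append(line)
--     if doc != []: docs.append(doc)
--     return docs
-- ===== SOURCE B (Python) =====
-- from itertools import groupby
--
-- def readDocs(lines):
--     return [list(g) for k, g in groupby(lines, key=lambda line: line.strip() == "") if not k]
-- ===== Notes on version B (the rewrite author's own statement) =====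
-- stated objective: idiomatic
-- what changed: Replaces the manual doc accumulator with its reset, two non-empty guards and post-loop flush by itertools.groupby keyed on line blankness, keeping each non-blank run.
import Mathlib
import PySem

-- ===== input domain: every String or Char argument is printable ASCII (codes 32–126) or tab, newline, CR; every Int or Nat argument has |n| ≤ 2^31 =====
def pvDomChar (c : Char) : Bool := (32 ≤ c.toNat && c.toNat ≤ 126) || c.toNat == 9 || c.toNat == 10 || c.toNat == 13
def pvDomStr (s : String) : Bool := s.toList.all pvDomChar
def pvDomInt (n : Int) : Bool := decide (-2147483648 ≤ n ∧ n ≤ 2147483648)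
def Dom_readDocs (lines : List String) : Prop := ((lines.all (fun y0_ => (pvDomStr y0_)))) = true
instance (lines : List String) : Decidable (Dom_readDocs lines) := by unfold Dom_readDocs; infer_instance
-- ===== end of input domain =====

-- B rewrites A's manual accumulator loop as itertools.groupby keyed on blankness, keeping non-blank runs (idiomatic; same cost).

-- ===== PORT A =====
-- the for-loop over `lines` with state (docs, doc), then the post-loop flush
def readDocsLoop (docs : List (List String)) (doc : List String) :
    List String → List (List String)
  | [] => if doc ≠ [] then docs ++ [doc] else docs
  | line :: rest =>
    if PySem.Str.strip line == "" then
      readDocsLoop (if doc ≠ [] then docs ++ [doc] else docs) [] rest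
    else
      readDocsLoop docs (doc ++ [line]) rest

def readDocs (lines : List String) : List (List String) :=
  readDocsLoop [] [] lines

-- ===== PORT B =====
-- the key function: line.strip() == ""
def pvBlank (line : String) : Bool := PySem.Str.strip line == ""

-- groupby(lines, key=pvBlank): maximal runs of equal key, in order
def pvGroups : List String → List (Bool × List String)
  | [] => []
  | l :: rest =>
    (pvBlank l, l :: rest.takeWhile (fun y => pvBlank y == pvBlank l)) ::
      pvGroups (rest.dropWhile (fun y => pvBlank y == pvBlank l))
termination_by lines => lines.length
decreasing_by
  simpa using Nat.lt_succ_of_le (List.length_dropWhile_le _ _)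

-- [list(g) for k, g in groupby(...) if not k]
def readDocs_alt (lines : List String) : List (List String) :=
  (pvGroups lines).filterMap (fun p => if p.1 then none else some p.2)

-- ===== PRECONDITION & SPEC =====
def Spec_readDocs (lines : List String) (out : List (List String)) : Prop := out = readDocs_alt lines
instance (lines : List String) (out : List (List String)) : Decidable (Spec_readDocs lines out) := by unfold Spec_readDocs; infer_instance

-- ===== CLAIM (what is proved, stated in full; the proofs are below) =====
def Claim_equal_readDocs : Prop := ∀ (lines : List String), Dom_readDocs lines → Spec_readDocs lines (readDocs lines)

-- ===== LEMMAS AND PROOFS =====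

-- emitted docs so far distribute over the loop
theorem readDocsLoop_append (docs : List (List String)) (doc : List String)
    (lines : List String) :
    readDocsLoop docs doc lines = docs ++ readDocsLoop [] doc lines := by
  induction lines generalizing docs doc with
  | nil =>
    by_cases h : doc = [] <;> simp [readDocsLoop, h]
  | cons l rest ih =>
    by_cases hb : PySem.Str.strip l == ""
    · simp only [readDocsLoop, hb, if_true]
      by_cases h : doc = []
      · simp only [h, ne_eq, not_true_eq_false, if_false]
        exact ih docs []
      · simp only [ne_eq, h, not_false_iff, if_true]
        rw [ih (docs ++ [doc]), ih ([] ++ [doc])]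
        simp [List.append_assoc]
    · simp only [readDocsLoop, hb, if_false, Bool.false_eq_true]
      exact ih docs (doc ++ [l])

-- the pending doc merged into the head of the grouped result
def pvMergeFirst (doc : List String) : List (Bool × List String) → List (List String)
  | [] => if doc = [] then [] else [doc]
  | (true, _) :: rs => (if doc = [] then [] else [doc]) ++
      rs.filterMap (fun p => if p.1 then none else some p.2)
  | (false, g) :: rs => (doc ++ g) ::
      rs.filterMap (fun p => if p.1 then none else some p.2)

theorem pvMergeFirst_nil (rs : List (Bool × List String)) :
    pvMergeFirst [] rs = rs.filterMap (fun p => if p.1 then none else some p.2) := by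
  match rs with
  | [] => simp [pvMergeFirst]
  | (true, g) :: rs => simp [pvMergeFirst]
  | (false, g) :: rs => simp [pvMergeFirst]

-- groupby step when the next line continues the current run
theorem pvGroups_cons_same (l r : String) (rest : List String)
    (h : pvBlank r = pvBlank l) :
    pvGroups (l :: r :: rest) =
      (pvBlank l, l :: r :: rest.takeWhile (fun y => pvBlank y == pvBlank r)) ::
        pvGroups (rest.dropWhile (fun y => pvBlank y == pvBlank r)) := by
  rw [pvGroups]
  simp [h]

-- groupby step when the next line starts a new run
theorem pvGroups_cons_diff (l r : String) (rest : List String)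
    (h : pvBlank r ≠ pvBlank l) :
    pvGroups (l :: r :: rest) = (pvBlank l, [l]) :: pvGroups (r :: rest) := by
  rw [pvGroups]
  simp [h]

-- main invariant: the loop from a pending doc computes the merged grouped result
theorem readDocsLoop_eq_merge (lines : List String) (doc : List String) :
    readDocsLoop [] doc lines = pvMergeFirst doc (pvGroups lines) := by
  induction lines generalizing doc with
  | nil =>
    by_cases h : doc = [] <;> simp [readDocsLoop, pvGroups, pvMergeFirst, h]
  | cons l rest ih =>
    by_cases hb : pvBlank l
    · -- blank line: flush doc, continue with []
      have hb' : (PySem.Str.strip l == "") = true := hb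
      rw [show readDocsLoop [] doc (l :: rest) =
            readDocsLoop (if doc ≠ [] then [] ++ [doc] else []) [] rest by
          simp [readDocsLoop, hb']]
      rw [readDocsLoop_append, ih, pvMergeFirst_nil]
      match rest with
      | [] =>
        by_cases h : doc = [] <;>
          simp [pvGroups, pvMergeFirst, hb, h]
      | r :: rest' =>
        by_cases hr : pvBlank r = pvBlank l
        · rw [pvGroups_cons_same l r rest' hr, pvGroups]
          by_cases h : doc = [] <;>
            simp [pvMergeFirst, hb, hr, h]
        · rw [pvGroups_cons_diff l r rest' hr]
          by_cases h : doc = [] <;>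
            simp [pvMergeFirst, hb, h]
    · -- non-blank line: extend doc
      have hb' : (PySem.Str.strip l == "") = false := by
        simpa [pvBlank] using hb
      rw [show readDocsLoop [] doc (l :: rest) =
            readDocsLoop [] (doc ++ [l]) rest by simp [readDocsLoop, hb']]
      rw [ih]
      match rest with
      | [] =>
        simp [pvGroups, pvMergeFirst, (Bool.not_eq_true _).mp hb]
      | r :: rest' =>
        by_cases hr : pvBlank r = pvBlank l
        · rw [pvGroups_cons_same l r rest' hr, pvGroups]
          have hrb : pvBlank r = false := by rw [hr]; exact (Bool.not_eq_true _).mp hb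
          simp [pvMergeFirst, hrb, (Bool.not_eq_true _).mp hb]
        · rw [pvGroups_cons_diff l r rest' hr, pvGroups]
          have hrb : pvBlank r = true := by
            cases h' : pvBlank r with
            | true => rfl
            | false => exact absurd (by simp [h', (Bool.not_eq_true _).mp hb]) hr
          simp [pvMergeFirst, hrb, (Bool.not_eq_true _).mp hb]

-- ===== VERDICT (by name: the statement is the Claim_ definition above) =====
theorem readDocs_spec : Claim_equal_readDocs := by
  intro lines _
  unfold Spec_readDocs readDocs readDocs_alt
  rw [readDocsLoop_eq_merge, pvMergeFirst_nil]
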